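-- pv_equiv track=rewrite | github.com/BobBuildTool/basement | plugins/multiarch.py | armResolveFgroups
-- ===== SOURCE A (Python) =====
-- ARM_FGROUPS = {'ALL_CRYPTO': {'crypto'},
--                'ALL_FP': {'ALL_FPU_INTERNAL', 'ALL_FPU_EXTERNAL', 'ALL_SIMD'},
--                'ALL_FPU_EXTERNAL': {'bf16', 'fp16'},
--                'ALL_FPU_INTERNAL': {'ALL_SIMD_INTERNAL', 'fp16conv', 'fp_dbl', 'fpv5',
--                                     'vfpv2', 'vfpv3', 'vfpv4'},
--                'ALL_QUIRKS': {'quirk_aes_1742098', 'quirk_armv6kz', 'quirk_cm3_ldrd',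
--                               'quirk_no_asmcpu', 'quirk_no_volatile_ce', 'quirk_vlldm',
--                               'xscale'},
--                'ALL_SIMD': {'ALL_SIMD_INTERNAL', 'ALL_SIMD_EXTERNAL'},
--                'ALL_SIMD_EXTERNAL': {'i8mm', 'fp16fml', 'dotprod'},
--                'ALL_SIMD_INTERNAL': {'neon', 'ALL_CRYPTO', 'fp_d32'},
--                'ARMv4': {'notm', 'armv4'},
--                'ARMv4t': {'ARMv4', 'thumb'},
--                'ARMv5t': {'ARMv4t', 'armv5t'},
--                'ARMv5te': {'ARMv5t', 'armv5te'},
--                'ARMv5tej': {'ARMv5te'},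
--                'ARMv6': {'armv6', 'be8', 'ARMv5te'},
--                'ARMv6j': {'ARMv6'},
--                'ARMv6k': {'armv6k', 'ARMv6'},
--                'ARMv6kz': {'ARMv6k', 'quirk_armv6kz'},
--                'ARMv6m': {'armv4', 'armv6', 'thumb', 'armv5t', 'be8', 'armv5te'},
--                'ARMv6t2': {'thumb2', 'ARMv6'},
--                'ARMv6z': {'ARMv6'},
--                'ARMv6zk': {'ARMv6k'},
--                'ARMv7': {'thumb2', 'armv7', 'ARMv6m'},
--                'ARMv7a': {'armv6k', 'notm', 'ARMv7'},
--                'ARMv7em': {'ARMv7m', 'armv7em'},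
--                'ARMv7m': {'tdiv', 'ARMv7'},
--                'ARMv7r': {'ARMv7a', 'tdiv'},
--                'ARMv7ve': {'lpae', 'adiv', 'ARMv7a', 'tdiv', 'mp', 'sec'},
--                'ARMv8_1a': {'crc32', 'armv8_1', 'ARMv8a'},
--                'ARMv8_1m_main': {'ARMv8m_main', 'armv8_1m_main'},
--                'ARMv8_2a': {'ARMv8_1a', 'armv8_2'},
--                'ARMv8_3a': {'ARMv8_2a', 'armv8_3'},
--                'ARMv8_4a': {'armv8_4', 'ARMv8_3a'},
--                'ARMv8_5a': {'ARMv8_4a', 'predres', 'sb', 'armv8_5'},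
--                'ARMv8_6a': {'ARMv8_5a', 'armv8_6'},
--                'ARMv8a': {'armv8', 'ARMv7ve'},
--                'ARMv8m_base': {'cmse', 'armv8', 'tdiv', 'ARMv6m'},
--                'ARMv8m_main': {'ARMv7m', 'cmse', 'armv8'},
--                'ARMv8r': {'ARMv8a'},
--                'ARMv9a': {'armv9', 'ARMv8_5a'},
--                'CRYPTO': {'NEON', 'crypto'},
--                'DOTPROD': {'NEON', 'dotprod'},
--                'FP_ARMv8': {'FP_D32', 'FPv5'},
--                'FP_D32': {'fp_d32', 'FP_DBL'},
--                'FP_DBL': {'fp_dbl'},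
--                'FPv5': {'fpv5', 'VFPv4'},
--                'IGNORE_FOR_MULTILIB': {'cdecp0', 'cdecp1', 'cdecp2', 'cdecp3', 'cdecp4',
--                                        'cdecp5', 'cdecp6', 'cdecp7'},
--                'MVE': {'armv7em', 'mve'},
--                'MVE_FP': {'MVE', 'mve_float', 'FPv5', 'fp16'},
--                'NEON': {'neon', 'FP_D32'},
--                'VFPv2': {'vfpv2'},
--                'VFPv3': {'VFPv2', 'vfpv3'},
--                'VFPv4': {'VFPv3', 'fp16conv', 'vfpv4'}}
--
-- def armResolveFgroups(features):
--     ret = None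
--     while True:
--         ret = set()
--         for i in features:
--             ret |= ARM_FGROUPS.get(i, set([i]))
--         if ret == features:
--             break
--         else:
--             features = ret
--     return ret
-- ===== SOURCE B (Python) =====
-- ARM_FGROUPS = {'ALL_CRYPTO': {'crypto'},
--                'ALL_FP': {'ALL_FPU_INTERNAL', 'ALL_FPU_EXTERNAL', 'ALL_SIMD'},
--                'ALL_FPU_EXTERNAL': {'bf16', 'fp16'},
--                'ALL_FPU_INTERNAL': {'ALL_SIMD_INTERNAL', 'fp16conv', 'fp_dbl', 'fpv5',
--                                     'vfpv2', 'vfpv3', 'vfpv4'},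
--                'ALL_QUIRKS': {'quirk_aes_1742098', 'quirk_armv6kz', 'quirk_cm3_ldrd',
--                               'quirk_no_asmcpu', 'quirk_no_volatile_ce', 'quirk_vlldm',
--                               'xscale'},
--                'ALL_SIMD': {'ALL_SIMD_INTERNAL', 'ALL_SIMD_EXTERNAL'},
--                'ALL_SIMD_EXTERNAL': {'i8mm', 'fp16fml', 'dotprod'},
--                'ALL_SIMD_INTERNAL': {'neon', 'ALL_CRYPTO', 'fp_d32'},
--                'ARMv4': {'notm', 'armv4'},
--                'ARMv4t': {'ARMv4', 'thumb'},
--                'ARMv5t': {'ARMv4t', 'armv5t'},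
--                'ARMv5te': {'ARMv5t', 'armv5te'},
--                'ARMv5tej': {'ARMv5te'},
--                'ARMv6': {'armv6', 'be8', 'ARMv5te'},
--                'ARMv6j': {'ARMv6'},
--                'ARMv6k': {'armv6k', 'ARMv6'},
--                'ARMv6kz': {'ARMv6k', 'quirk_armv6kz'},
--                'ARMv6m': {'armv4', 'armv6', 'thumb', 'armv5t', 'be8', 'armv5te'},
--                'ARMv6t2': {'thumb2', 'ARMv6'},
--                'ARMv6z': {'ARMv6'},
--                'ARMv6zk': {'ARMv6k'},
--                'ARMv7': {'thumb2', 'armv7', 'ARMv6m'},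
--                'ARMv7a': {'armv6k', 'notm', 'ARMv7'},
--                'ARMv7em': {'ARMv7m', 'armv7em'},
--                'ARMv7m': {'tdiv', 'ARMv7'},
--                'ARMv7r': {'ARMv7a', 'tdiv'},
--                'ARMv7ve': {'lpae', 'adiv', 'ARMv7a', 'tdiv', 'mp', 'sec'},
--                'ARMv8_1a': {'crc32', 'armv8_1', 'ARMv8a'},
--                'ARMv8_1m_main': {'ARMv8m_main', 'armv8_1m_main'},
--                'ARMv8_2a': {'ARMv8_1a', 'armv8_2'},
--                'ARMv8_3a': {'ARMv8_2a', 'armv8_3'},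
--                'ARMv8_4a': {'armv8_4', 'ARMv8_3a'},
--                'ARMv8_5a': {'ARMv8_4a', 'predres', 'sb', 'armv8_5'},
--                'ARMv8_6a': {'ARMv8_5a', 'armv8_6'},
--                'ARMv8a': {'armv8', 'ARMv7ve'},
--                'ARMv8m_base': {'cmse', 'armv8', 'tdiv', 'ARMv6m'},
--                'ARMv8m_main': {'ARMv7m', 'cmse', 'armv8'},
--                'ARMv8r': {'ARMv8a'},
--                'ARMv9a': {'armv9', 'ARMv8_5a'},
--                'CRYPTO': {'NEON', 'crypto'},
--                'DOTPROD': {'NEON', 'dotprod'},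
--                'FP_ARMv8': {'FP_D32', 'FPv5'},
--                'FP_D32': {'fp_d32', 'FP_DBL'},
--                'FP_DBL': {'fp_dbl'},
--                'FPv5': {'fpv5', 'VFPv4'},
--                'IGNORE_FOR_MULTILIB': {'cdecp0', 'cdecp1', 'cdecp2', 'cdecp3', 'cdecp4',
--                                        'cdecp5', 'cdecp6', 'cdecp7'},
--                'MVE': {'armv7em', 'mve'},
--                'MVE_FP': {'MVE', 'mve_float', 'FPv5', 'fp16'},
--                'NEON': {'neon', 'FP_D32'},
--                'VFPv2': {'vfpv2'},
--                'VFPv3': {'VFPv2', 'vfpv3'},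
--                'VFPv4': {'VFPv3', 'fp16conv', 'vfpv4'}}
--
-- def armResolveFgroups(features):
--     # Single depth-first reachability traversal with a visited set: each group
--     # name is expanded at most once; terminal features are collected in
--     # first-visit order and returned as a set.
--     seen = set()
--     order = []
--     def visit(s):
--         if s not in seen:
--             seen.add(s)
--             members = ARM_FGROUPS.get(s)
--             if members is None:
--                 order.append(s)
--             else:
--                 for m in members:
--                     visit(m)
--     for f in features:
--         visit(f)
--     return set(order)
-- ===== Notes on version B (the rewrite author's own statement) =====
-- stated objective: alternative
-- what changed: Replaces the repeated whole-set expansion rounds (re-expanding every element until the set reaches a fixed point) by a single depth-first reachability traversal with a visited set that expands each group name at most once and collects terminal features directly.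
import Mathlib
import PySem

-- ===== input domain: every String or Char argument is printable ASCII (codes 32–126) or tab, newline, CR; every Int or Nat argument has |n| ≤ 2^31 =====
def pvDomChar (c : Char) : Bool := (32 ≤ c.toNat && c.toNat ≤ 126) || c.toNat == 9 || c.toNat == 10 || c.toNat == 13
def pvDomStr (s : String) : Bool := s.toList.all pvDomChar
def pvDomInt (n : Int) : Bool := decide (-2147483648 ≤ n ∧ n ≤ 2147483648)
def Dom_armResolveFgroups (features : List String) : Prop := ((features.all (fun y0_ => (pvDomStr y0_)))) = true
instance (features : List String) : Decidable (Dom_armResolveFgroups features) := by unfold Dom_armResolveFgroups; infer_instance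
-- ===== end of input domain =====

set_option maxRecDepth 1000000



-- B replaces A's repeated whole-set expansion rounds by a single depth-first
-- reachability traversal with a visited set, collecting terminals directly.

-- ===== PORT A =====
-- module constant ARM_FGROUPS as A uses it: a dict of sets (each set's elements
-- listed in Source A's source order — Python sets carry no iteration order and both
-- functions return a set, so any fixed order is a faithful model)
def fgL : List (String × List String) := [
  ("ALL_CRYPTO", ["crypto"]),
  ("ALL_FP", ["ALL_FPU_INTERNAL", "ALL_FPU_EXTERNAL", "ALL_SIMD"]),
  ("ALL_FPU_EXTERNAL", ["bf16", "fp16"]),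
  ("ALL_FPU_INTERNAL", ["ALL_SIMD_INTERNAL", "fp16conv", "fp_dbl", "fpv5", "vfpv2", "vfpv3", "vfpv4"]),
  ("ALL_QUIRKS", ["quirk_aes_1742098", "quirk_armv6kz", "quirk_cm3_ldrd", "quirk_no_asmcpu", "quirk_no_volatile_ce", "quirk_vlldm", "xscale"]),
  ("ALL_SIMD", ["ALL_SIMD_INTERNAL", "ALL_SIMD_EXTERNAL"]),
  ("ALL_SIMD_EXTERNAL", ["i8mm", "fp16fml", "dotprod"]),
  ("ALL_SIMD_INTERNAL", ["neon", "ALL_CRYPTO", "fp_d32"]),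
  ("ARMv4", ["notm", "armv4"]),
  ("ARMv4t", ["ARMv4", "thumb"]),
  ("ARMv5t", ["ARMv4t", "armv5t"]),
  ("ARMv5te", ["ARMv5t", "armv5te"]),
  ("ARMv5tej", ["ARMv5te"]),
  ("ARMv6", ["armv6", "be8", "ARMv5te"]),
  ("ARMv6j", ["ARMv6"]),
  ("ARMv6k", ["armv6k", "ARMv6"]),
  ("ARMv6kz", ["ARMv6k", "quirk_armv6kz"]),
  ("ARMv6m", ["armv4", "armv6", "thumb", "armv5t", "be8", "armv5te"]),
  ("ARMv6t2", ["thumb2", "ARMv6"]),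
  ("ARMv6z", ["ARMv6"]),
  ("ARMv6zk", ["ARMv6k"]),
  ("ARMv7", ["thumb2", "armv7", "ARMv6m"]),
  ("ARMv7a", ["armv6k", "notm", "ARMv7"]),
  ("ARMv7em", ["ARMv7m", "armv7em"]),
  ("ARMv7m", ["tdiv", "ARMv7"]),
  ("ARMv7r", ["ARMv7a", "tdiv"]),
  ("ARMv7ve", ["lpae", "adiv", "ARMv7a", "tdiv", "mp", "sec"]),
  ("ARMv8_1a", ["crc32", "armv8_1", "ARMv8a"]),
  ("ARMv8_1m_main", ["ARMv8m_main", "armv8_1m_main"]),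
  ("ARMv8_2a", ["ARMv8_1a", "armv8_2"]),
  ("ARMv8_3a", ["ARMv8_2a", "armv8_3"]),
  ("ARMv8_4a", ["armv8_4", "ARMv8_3a"]),
  ("ARMv8_5a", ["ARMv8_4a", "predres", "sb", "armv8_5"]),
  ("ARMv8_6a", ["ARMv8_5a", "armv8_6"]),
  ("ARMv8a", ["armv8", "ARMv7ve"]),
  ("ARMv8m_base", ["cmse", "armv8", "tdiv", "ARMv6m"]),
  ("ARMv8m_main", ["ARMv7m", "cmse", "armv8"]),
  ("ARMv8r", ["ARMv8a"]),
  ("ARMv9a", ["armv9", "ARMv8_5a"]),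
  ("CRYPTO", ["NEON", "crypto"]),
  ("DOTPROD", ["NEON", "dotprod"]),
  ("FP_ARMv8", ["FP_D32", "FPv5"]),
  ("FP_D32", ["fp_d32", "FP_DBL"]),
  ("FP_DBL", ["fp_dbl"]),
  ("FPv5", ["fpv5", "VFPv4"]),
  ("IGNORE_FOR_MULTILIB", ["cdecp0", "cdecp1", "cdecp2", "cdecp3", "cdecp4", "cdecp5", "cdecp6", "cdecp7"]),
  ("MVE", ["armv7em", "mve"]),
  ("MVE_FP", ["MVE", "mve_float", "FPv5", "fp16"]),
  ("NEON", ["neon", "FP_D32"]),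
  ("VFPv2", ["vfpv2"]),
  ("VFPv3", ["VFPv2", "vfpv3"]),
  ("VFPv4", ["VFPv3", "fp16conv", "vfpv4"])
]

def fg : PySem.Dict String (List String) := PySem.Dict.ofList fgL

-- one "ret = set(); for i in features: ret |= ARM_FGROUPS.get(i, set([i]))" pass
def armRound (S : List String) : PySem.Set String :=
  S.foldl (fun ret i => PySem.Set.union ret ((fg.get? i).getD [i])) PySem.Set.empty

-- the "while True" loop from its second iteration on ("ret == features" there
-- compares two sets).  The fuel only guards totality: 16 rounds always reach the
-- fixed point (proved below), so the fuel-exhausted branch is never taken.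
def armLoop : Nat → PySem.Set String → PySem.Set String
  | 0, S => armRound S
  | fuel + 1, S =>
    let ret := armRound S
    if PySem.Set.equal ret S then ret else armLoop fuel ret

-- on the FIRST iteration Python compares a set with the original argument list
-- ("ret == features" with features still a list), which is always False, so A
-- always enters the second iteration with features = ret.
def armResolveFgroups (features : List String) : List String :=
  armLoop 16 (armRound features)

-- ===== PORT B =====
-- B's view of the same module constant ARM_FGROUPS: an association list (the
-- standard model of a Python dict; members in Source A's source order) with
-- 'ARM_FGROUPS.get(s)' as first-match lookup
def fgBL : List (String × List String) :=
  ("ALL_CRYPTO", "crypto" :: []) ::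
  ("ALL_FP", "ALL_FPU_INTERNAL" :: "ALL_FPU_EXTERNAL" :: "ALL_SIMD" :: []) ::
  ("ALL_FPU_EXTERNAL", "bf16" :: "fp16" :: []) ::
  ("ALL_FPU_INTERNAL", "ALL_SIMD_INTERNAL" :: "fp16conv" :: "fp_dbl" :: "fpv5" :: "vfpv2" :: "vfpv3" :: "vfpv4" :: []) ::
  ("ALL_QUIRKS", "quirk_aes_1742098" :: "quirk_armv6kz" :: "quirk_cm3_ldrd" :: "quirk_no_asmcpu" :: "quirk_no_volatile_ce" :: "quirk_vlldm" :: "xscale" :: []) ::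
  ("ALL_SIMD", "ALL_SIMD_INTERNAL" :: "ALL_SIMD_EXTERNAL" :: []) ::
  ("ALL_SIMD_EXTERNAL", "i8mm" :: "fp16fml" :: "dotprod" :: []) ::
  ("ALL_SIMD_INTERNAL", "neon" :: "ALL_CRYPTO" :: "fp_d32" :: []) ::
  ("ARMv4", "notm" :: "armv4" :: []) ::
  ("ARMv4t", "ARMv4" :: "thumb" :: []) ::
  ("ARMv5t", "ARMv4t" :: "armv5t" :: []) ::
  ("ARMv5te", "ARMv5t" :: "armv5te" :: []) ::
  ("ARMv5tej", "ARMv5te" :: []) ::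
  ("ARMv6", "armv6" :: "be8" :: "ARMv5te" :: []) ::
  ("ARMv6j", "ARMv6" :: []) ::
  ("ARMv6k", "armv6k" :: "ARMv6" :: []) ::
  ("ARMv6kz", "ARMv6k" :: "quirk_armv6kz" :: []) ::
  ("ARMv6m", "armv4" :: "armv6" :: "thumb" :: "armv5t" :: "be8" :: "armv5te" :: []) ::
  ("ARMv6t2", "thumb2" :: "ARMv6" :: []) ::
  ("ARMv6z", "ARMv6" :: []) ::
  ("ARMv6zk", "ARMv6k" :: []) ::
  ("ARMv7", "thumb2" :: "armv7" :: "ARMv6m" :: []) ::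
  ("ARMv7a", "armv6k" :: "notm" :: "ARMv7" :: []) ::
  ("ARMv7em", "ARMv7m" :: "armv7em" :: []) ::
  ("ARMv7m", "tdiv" :: "ARMv7" :: []) ::
  ("ARMv7r", "ARMv7a" :: "tdiv" :: []) ::
  ("ARMv7ve", "lpae" :: "adiv" :: "ARMv7a" :: "tdiv" :: "mp" :: "sec" :: []) ::
  ("ARMv8_1a", "crc32" :: "armv8_1" :: "ARMv8a" :: []) ::
  ("ARMv8_1m_main", "ARMv8m_main" :: "armv8_1m_main" :: []) ::
  ("ARMv8_2a", "ARMv8_1a" :: "armv8_2" :: []) ::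
  ("ARMv8_3a", "ARMv8_2a" :: "armv8_3" :: []) ::
  ("ARMv8_4a", "armv8_4" :: "ARMv8_3a" :: []) ::
  ("ARMv8_5a", "ARMv8_4a" :: "predres" :: "sb" :: "armv8_5" :: []) ::
  ("ARMv8_6a", "ARMv8_5a" :: "armv8_6" :: []) ::
  ("ARMv8a", "armv8" :: "ARMv7ve" :: []) ::
  ("ARMv8m_base", "cmse" :: "armv8" :: "tdiv" :: "ARMv6m" :: []) ::
  ("ARMv8m_main", "ARMv7m" :: "cmse" :: "armv8" :: []) ::
  ("ARMv8r", "ARMv8a" :: []) ::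
  ("ARMv9a", "armv9" :: "ARMv8_5a" :: []) ::
  ("CRYPTO", "NEON" :: "crypto" :: []) ::
  ("DOTPROD", "NEON" :: "dotprod" :: []) ::
  ("FP_ARMv8", "FP_D32" :: "FPv5" :: []) ::
  ("FP_D32", "fp_d32" :: "FP_DBL" :: []) ::
  ("FP_DBL", "fp_dbl" :: []) ::
  ("FPv5", "fpv5" :: "VFPv4" :: []) ::
  ("IGNORE_FOR_MULTILIB", "cdecp0" :: "cdecp1" :: "cdecp2" :: "cdecp3" :: "cdecp4" :: "cdecp5" :: "cdecp6" :: "cdecp7" :: []) ::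
  ("MVE", "armv7em" :: "mve" :: []) ::
  ("MVE_FP", "MVE" :: "mve_float" :: "FPv5" :: "fp16" :: []) ::
  ("NEON", "neon" :: "FP_D32" :: []) ::
  ("VFPv2", "vfpv2" :: []) ::
  ("VFPv3", "VFPv2" :: "vfpv3" :: []) ::
  ("VFPv4", "VFPv3" :: "fp16conv" :: "vfpv4" :: []) ::
  []

def fgB (s : String) : Option (List String) := fgBL.lookup s

-- "for m in members: visit(m)" / "for f in features: visit(f)": run visit1 on
-- each element in turn, threading the (seen, order) state
def armVisitList (visit1 : String → PySem.Set String × List String → PySem.Set String × List String) :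
    List String → PySem.Set String × List String → PySem.Set String × List String
  | [], st => st
  | m :: ms, st => armVisitList visit1 ms (visit1 m st)

-- "def visit(s)" of Source B, state = (seen, order); the fuel is a totality guard
-- only: every expansion chain in ARM_FGROUPS has length ≤ 11, so 16 is never
-- exhausted (proved below)
def armVisitB : Nat → String → PySem.Set String × List String →
    PySem.Set String × List String
  | 0, _, st => st
  | fuel + 1, s, (seen, order) =>
    if PySem.Set.contains seen s then (seen, order)
    else
      let seen1 := PySem.Set.add seen s
      match fgB s with
      | none => (seen1, order ++ [s])
      | some ms => armVisitList (armVisitB fuel) ms (seen1, order)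

-- "for f in features: visit(f); return set(order)"
def armResolveFgroups_alt (features : List String) : List String :=
  PySem.Set.ofList (armVisitList (armVisitB 16) features (PySem.Set.empty, [])).2

-- ===== PRECONDITION & SPEC =====
def Spec_armResolveFgroups (features : List String) (out : List String) : Prop := out = armResolveFgroups_alt features
instance (features : List String) (out : List String) : Decidable (Spec_armResolveFgroups features out) := by unfold Spec_armResolveFgroups; infer_instance

-- ===== CLAIM (what is proved, stated in full; the proofs are below) =====
def Claim_equal_armResolveFgroups : Prop := ∀ (features : List String), Dom_armResolveFgroups features → Spec_armResolveFgroups features (armResolveFgroups features)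

-- ===== LEMMAS AND PROOFS =====

-- rank of a group name in the (acyclic) ARM_FGROUPS expansion graph; 0 for terminals
def rnkT : List (String × Nat) := [
  ("ALL_CRYPTO", 1),
  ("ALL_FP", 4),
  ("ALL_FPU_EXTERNAL", 1),
  ("ALL_FPU_INTERNAL", 3),
  ("ALL_QUIRKS", 1),
  ("ALL_SIMD", 3),
  ("ALL_SIMD_EXTERNAL", 1),
  ("ALL_SIMD_INTERNAL", 2),
  ("ARMv4", 1),
  ("ARMv4t", 2),
  ("ARMv5t", 3),
  ("ARMv5te", 4),
  ("ARMv5tej", 5),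
  ("ARMv6", 5),
  ("ARMv6j", 6),
  ("ARMv6k", 6),
  ("ARMv6kz", 7),
  ("ARMv6m", 1),
  ("ARMv6t2", 6),
  ("ARMv6z", 6),
  ("ARMv6zk", 7),
  ("ARMv7", 2),
  ("ARMv7a", 3),
  ("ARMv7em", 4),
  ("ARMv7m", 3),
  ("ARMv7r", 4),
  ("ARMv7ve", 4),
  ("ARMv8_1a", 6),
  ("ARMv8_1m_main", 5),
  ("ARMv8_2a", 7),
  ("ARMv8_3a", 8),
  ("ARMv8_4a", 9),
  ("ARMv8_5a", 10),
  ("ARMv8_6a", 11),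
  ("ARMv8a", 5),
  ("ARMv8m_base", 2),
  ("ARMv8m_main", 4),
  ("ARMv8r", 6),
  ("ARMv9a", 11),
  ("CRYPTO", 4),
  ("DOTPROD", 4),
  ("FP_ARMv8", 5),
  ("FP_D32", 2),
  ("FP_DBL", 1),
  ("FPv5", 4),
  ("IGNORE_FOR_MULTILIB", 1),
  ("MVE", 1),
  ("MVE_FP", 5),
  ("NEON", 3),
  ("VFPv2", 1),
  ("VFPv3", 2),
  ("VFPv4", 3)
]

def rnk (s : String) : Nat := (rnkT.lookup s).getD 0

theorem lookup_mem {ν : Type} : ∀ (l : List (String × ν)) (s : String) (v : ν),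
    l.lookup s = some v → (s, v) ∈ l := by
  intro l
  induction l with
  | nil => intro s v h; simp [List.lookup] at h
  | cons p rest ih =>
    intro s v h
    obtain ⟨k, w⟩ := p
    cases hk : s == k with
    | true =>
      have hsk : s = k := by simpa using hk
      simp only [List.lookup, hk] at h
      obtain rfl : w = v := Option.some.inj h
      simp [hsk]
    | false =>
      simp only [List.lookup, hk] at h
      exact List.mem_cons_of_mem _ (ih s v h)

set_option maxRecDepth 40000 in
theorem rnk_le (s : String) : rnk s ≤ 11 := by
  unfold rnk
  cases h : rnkT.lookup s with
  | none => simp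
  | some v =>
    have hm : (s, v) ∈ rnkT := lookup_mem _ _ _ h
    have hall : ∀ p ∈ rnkT, p.2 ≤ 11 := by decide
    simpa using hall _ hm

theorem get?_mk_mem {ν : Type} : ∀ (l : List (String × ν)) (x : String) (ms : ν),
    (PySem.Dict.mk l).get? x = some ms → (x, ms) ∈ l := by
  intro l
  induction l with
  | nil => intro x ms h; simp [PySem.Dict.get?] at h
  | cons p rest ih =>
    intro x ms h
    obtain ⟨k, v⟩ := p
    rw [PySem.Dict.get?_mk_cons] at h
    by_cases hk : (k == x) = true
    · rw [if_pos hk] at h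
      obtain rfl : v = ms := Option.some.inj h
      have hkx : k = x := by simpa using hk
      simp [hkx]
    · rw [if_neg hk] at h
      exact List.mem_cons_of_mem _ (ih x ms h)

theorem get?_mk_eq_lookup {ν : Type} : ∀ (l : List (String × ν)) (x : String),
    (PySem.Dict.mk l).get? x = l.lookup x := by
  intro l
  induction l with
  | nil => intro x; rfl
  | cons p rest ih =>
    intro x
    obtain ⟨k, v⟩ := p
    rw [PySem.Dict.get?_mk_cons]
    by_cases h : k = x
    · subst h
      simp [List.lookup]
    · have h1 : (k == x) = false := by simpa using h
      have h2 : (x == k) = false := by simpa using Ne.symm h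
      simp [List.lookup, h1, h2, ih]

set_option maxRecDepth 40000 in
theorem fg_eq_mk : fg = PySem.Dict.mk fgL := by decide

-- B's association-list lookup agrees pointwise with A's dict lookup
theorem fgB_eq (s : String) : fgB s = fg.get? s := by
  unfold fgB
  have hL : fgBL = fgL := rfl
  rw [hL, fg_eq_mk, get?_mk_eq_lookup]

-- edge fact: keys have positive rank and members have strictly smaller rank
set_option maxRecDepth 400000 in
theorem fg_edges (s : String) (ms : List String) (h : fg.get? s = some ms) :
    0 < rnk s ∧ ∀ m ∈ ms, rnk m < rnk s := by
  rw [fg_eq_mk] at h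
  have hm := get?_mk_mem _ _ _ h
  have key : ∀ p ∈ fgL, 0 < rnk p.1 ∧ ∀ m ∈ p.2, rnk m < rnk p.1 := by decide
  exact key _ hm

theorem get?_of_rnk_zero (s : String) (h : rnk s = 0) : fg.get? s = none := by
  cases hg : fg.get? s with
  | none => rfl
  | some ms => exact absurd h (by have := (fg_edges s ms hg).1; omega)

set_option maxRecDepth 400000 in
theorem rnk_zero_of_get?_none (s : String) (h : fg.get? s = none) : rnk s = 0 := by
  unfold rnk
  cases hl : rnkT.lookup s with
  | none => rfl
  | some v =>
    have hm : (s, v) ∈ rnkT := lookup_mem _ _ _ hl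
    have key : ∀ p ∈ rnkT, (fg.get? p.1).isSome := by decide
    have := key _ hm
    simp [h] at this

-- the terminal-leaf sequence of a name, with fuel
def leaves : Nat → String → List String
  | 0, s => [s]
  | n + 1, s =>
    match fg.get? s with
    | none => [s]
    | some ms => ms.flatMap (leaves n)

theorem leaves_stable : ∀ n m s, rnk s ≤ n → rnk s ≤ m → leaves n s = leaves m s := by
  intro n
  induction n with
  | zero =>
    intro m s hn _
    have h0 : fg.get? s = none := get?_of_rnk_zero s (Nat.le_zero.mp hn)
    cases m with
    | zero => rfl
    | succ m => simp [leaves, h0]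
  | succ n ih =>
    intro m s hn hm
    cases hg : fg.get? s with
    | none =>
      cases m with
      | zero => simp [leaves, hg]
      | succ m => simp [leaves, hg]
    | some ms =>
      obtain ⟨hpos, hlt⟩ := fg_edges s ms hg
      cases m with
      | zero => omega
      | succ m =>
        simp only [leaves, hg]
        exact List.flatMap_congr fun x hx =>
          ih m x (by have := hlt x hx; omega) (by have := hlt x hx; omega)

def Lv (s : String) : List String := leaves 12 s

theorem Lv_unfold (s : String) :
    Lv s = match fg.get? s with | none => [s] | some ms => ms.flatMap Lv := by
  cases hg : fg.get? s with
  | none => show Lv s = [s]; simp [Lv, leaves, hg]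
  | some ms =>
    show Lv s = ms.flatMap Lv
    obtain ⟨_, hlt⟩ := fg_edges s ms hg
    simp only [Lv, leaves, hg]
    exact List.flatMap_congr fun x hx =>
      leaves_stable 11 12 x (by have := hlt x hx; have := rnk_le s; omega)
        (by have := rnk_le x; omega)

-- the canonical answer: first occurrences of the terminal-leaf sequence
def canonC (S : List String) : PySem.Set String :=
  PySem.Set.update PySem.Set.empty (S.flatMap Lv)

-- updating with already-present elements is a no-op
theorem update_of_subset (s : PySem.Set String) :
    ∀ Y, (∀ y ∈ Y, y ∈ s) → PySem.Set.update s Y = s := by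
  intro Y
  induction Y generalizing s with
  | nil => intro _; exact PySem.Set.update_nil s
  | cons y Y ih =>
    intro h
    rw [PySem.Set.update_cons, PySem.Set.add_of_mem (h y (by simp))]
    exact ih s fun z hz => h z (by simp [hz])

-- dedupping a list before flat-mapping f and set-updating does not change the result
theorem update_flatMap_update (f : String → List String) :
    ∀ (L : List String) (s acc : PySem.Set String),
      PySem.Set.update acc ((PySem.Set.update s L).flatMap f) =
      PySem.Set.update acc ((s ++ L).flatMap f) := by
  intro L
  induction L with
  | nil => intro s acc; simp [PySem.Set.update_nil]
  | cons x L ih =>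
    intro s acc
    rw [PySem.Set.update_cons]
    by_cases hx : x ∈ s
    · rw [PySem.Set.add_of_mem hx, ih]
      have h1 : (s ++ L).flatMap f = s.flatMap f ++ L.flatMap f := List.flatMap_append
      have h2 : (s ++ x :: L).flatMap f = s.flatMap f ++ (f x ++ L.flatMap f) := by
        simp [List.flatMap_append]
      rw [h1, h2, PySem.Set.update_append, PySem.Set.update_append, PySem.Set.update_append]
      congr 1
      refine (update_of_subset _ (f x) fun y hy => ?_).symm
      exact (PySem.Set.mem_update _ _ _).mpr (Or.inr (List.mem_flatMap.mpr ⟨x, hx, hy⟩))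
    · rw [PySem.Set.add_of_not_mem hx, ih]
      simp [List.flatMap_append, List.append_assoc]

-- armRound is one flat expansion step, dedupped
def expand1 (s : String) : List String := (fg.get? s).getD [s]

theorem armRound_eq (S : List String) : armRound S = PySem.Set.ofList (S.flatMap expand1) := by
  have key : ∀ (S : List String) (acc : PySem.Set String),
      S.foldl (fun ret i => PySem.Set.union ret ((fg.get? i).getD [i])) acc =
      PySem.Set.update acc (S.flatMap expand1) := by
    intro S
    induction S with
    | nil => intro acc; simp [PySem.Set.update_nil]
    | cons x S ih =>
      intro acc
      rw [List.foldl_cons, ih, List.flatMap_cons, PySem.Set.update_append]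
      rfl
  rw [armRound, key]
  exact PySem.Set.update_empty _

theorem Lv_expand1 (s : String) : (expand1 s).flatMap Lv = Lv s := by
  cases hg : fg.get? s with
  | none => simp [expand1, hg]
  | some ms => rw [expand1, hg, Option.getD_some, Lv_unfold s, hg]

theorem canonC_armRound (S : List String) : canonC (armRound S) = canonC S := by
  rw [armRound_eq, canonC, canonC, ← PySem.Set.update_empty (S.flatMap expand1),
    update_flatMap_update]
  have he : (PySem.Set.empty ++ S.flatMap expand1) = S.flatMap expand1 := by
    simp [PySem.Set.empty]
  rw [he]
  congr 1
  rw [List.flatMap_assoc]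
  exact List.flatMap_congr fun x _ => Lv_expand1 x

def maxRnk (S : List String) : Nat := S.foldr (fun s a => max (rnk s) a) 0

theorem maxRnk_le {S : List String} {n : Nat} (h : ∀ x ∈ S, rnk x ≤ n) :
    maxRnk S ≤ n := by
  induction S with
  | nil => simp [maxRnk]
  | cons x S ih =>
    simp only [maxRnk, List.foldr_cons]
    have h1 := h x (by simp)
    have h2 := ih fun y hy => h y (by simp [hy])
    simp only [maxRnk] at h2
    omega

theorem le_maxRnk {S : List String} {x : String} (h : x ∈ S) : rnk x ≤ maxRnk S := by
  induction S with
  | nil => simp at h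
  | cons y S ih =>
    simp only [maxRnk, List.foldr_cons]
    rcases List.mem_cons.mp h with rfl | h
    · omega
    · have := ih h; simp only [maxRnk] at this; omega

-- if S holds terminals only, one round is just dedup
theorem armRound_of_terminal {S : List String} (h : ∀ x ∈ S, fg.get? x = none) :
    armRound S = PySem.Set.ofList S := by
  rw [armRound_eq]
  congr 1
  have he : S.flatMap expand1 = S.flatMap (fun x => [x]) :=
    List.flatMap_congr fun x hx => by simp [expand1, h x hx]
  rw [he, List.flatMap_singleton']

theorem flatMap_Lv_of_terminal {S : List String} (h : ∀ x ∈ S, fg.get? x = none) :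
    S.flatMap Lv = S := by
  have he : S.flatMap Lv = S.flatMap (fun x => [x]) :=
    List.flatMap_congr fun x hx => by rw [Lv_unfold x, h x hx]
  rw [he, List.flatMap_singleton']

theorem canonC_of_terminal {S : List String} (hnd : S.Nodup)
    (h : ∀ x ∈ S, fg.get? x = none) : canonC S = S := by
  rw [canonC, flatMap_Lv_of_terminal h, PySem.Set.update_empty,
    PySem.Set.ofList_eq_self_of_nodup _ hnd]

-- a set-fixed-point of one round contains no group names
theorem no_key_of_equal {S : List String}
    (h : ∀ x, x ∈ armRound S ↔ x ∈ S) : ∀ t ∈ S, fg.get? t = none := by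
  by_contra hcon
  push Not at hcon
  obtain ⟨t0, ht0S, ht0⟩ := hcon
  set K := S.filter (fun s => (fg.get? s).isSome) with hK
  have hKne : K ≠ [] := by
    intro hnil
    have hmem : t0 ∈ K := List.mem_filter.mpr ⟨ht0S, by
      cases hg : fg.get? t0 with
      | none => exact absurd hg ht0
      | some _ => simp⟩
    simp [hnil] at hmem
  cases hag : K.argmax rnk with
  | none => exact hKne (List.argmax_eq_none.mp hag)
  | some k =>
    have hkmem : k ∈ K.argmax rnk := by simp [hag]
    have hkK : k ∈ K := List.argmax_mem hkmem
    have hkS : k ∈ S := (List.mem_filter.mp hkK).1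
    have hkkey : (fg.get? k).isSome := by simpa using (List.mem_filter.mp hkK).2
    have hkr : k ∈ armRound S := (h k).mpr hkS
    rw [armRound_eq] at hkr
    obtain ⟨t, htS, hkt⟩ := List.mem_flatMap.mp ((PySem.Set.mem_ofList _ _).mp hkr)
    cases hg : fg.get? t with
    | none =>
      have hkt' : k = t := by simpa [expand1, hg] using hkt
      rw [hkt', hg] at hkkey
      simp at hkkey
    | some ms =>
      have hlt : rnk k < rnk t := by
        have := (fg_edges t ms hg).2
        exact this k (by simpa [expand1, hg] using hkt)
      have htK : t ∈ K := List.mem_filter.mpr ⟨htS, by simp [hg]⟩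
      have := List.le_of_mem_argmax htK hkmem
      omega

-- the loop reaches the canonical answer
theorem armLoop_eq : ∀ (n : Nat) (S : PySem.Set String), S.Nodup → maxRnk S ≤ n →
    armLoop n S = canonC S := by
  intro n
  induction n with
  | zero =>
    intro S hnd hmax
    have hterm : ∀ x ∈ S, fg.get? x = none := fun x hx =>
      get?_of_rnk_zero x (Nat.le_zero.mp (le_trans (le_maxRnk hx) hmax))
    show armRound S = canonC S
    rw [armRound_of_terminal hterm, PySem.Set.ofList_eq_self_of_nodup _ hnd,
      canonC_of_terminal hnd hterm]
  | succ n ih =>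
    intro S hnd hmax
    show (if PySem.Set.equal (armRound S) S then armRound S else armLoop n (armRound S)) = canonC S
    by_cases heq : PySem.Set.equal (armRound S) S = true
    · rw [if_pos heq]
      have hiff : ∀ x, x ∈ armRound S ↔ x ∈ S := (PySem.Set.equal_iff _ _).mp heq
      have hterm := no_key_of_equal hiff
      rw [armRound_of_terminal hterm, PySem.Set.ofList_eq_self_of_nodup _ hnd,
        canonC_of_terminal hnd hterm]
    · rw [if_neg heq]
      have hndr : (armRound S).Nodup := by
        rw [armRound_eq]; exact PySem.Set.nodup_ofList _
      have hmaxr : maxRnk (armRound S) ≤ n := by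
        apply maxRnk_le
        intro x hx
        rw [armRound_eq] at hx
        obtain ⟨t, htS, hxt⟩ := List.mem_flatMap.mp ((PySem.Set.mem_ofList _ _).mp hx)
        cases hg : fg.get? t with
        | none =>
          have hxe : x = t := by simpa [expand1, hg] using hxt
          have := rnk_zero_of_get?_none t hg
          subst hxe
          omega
        | some ms =>
          have hlt : rnk x < rnk t := (fg_edges t ms hg).2 x (by simpa [expand1, hg] using hxt)
          have := le_maxRnk htS
          omega
      rw [ih (armRound S) hndr hmaxr, canonC_armRound]

theorem portA_eq (features : List String) : armResolveFgroups features = canonC features := by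
  have hnd : (armRound features).Nodup := by
    rw [armRound_eq]; exact PySem.Set.nodup_ofList _
  have hmax : maxRnk (armRound features) ≤ 16 :=
    maxRnk_le fun x _ => le_trans (rnk_le x) (by norm_num)
  rw [armResolveFgroups, armLoop_eq 16 _ hnd hmax, canonC_armRound]

-- ===== B side =====

theorem armVisitB_spec : ∀ (fuel : Nat) (s : String) (seen : PySem.Set String)
    (order : List String),
    rnk s < fuel →
    (∀ x ∈ seen, (∀ y ∈ Lv x, y ∈ order) ∨ rnk s < rnk x) →
    (∀ x ∈ order, x ∈ seen) →
    (armVisitB fuel s (seen, order)).2 = PySem.Set.update order (Lv s) ∧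
    (∀ x ∈ seen, x ∈ (armVisitB fuel s (seen, order)).1) ∧
    (∀ x ∈ (armVisitB fuel s (seen, order)).1,
      (∀ y ∈ Lv x, y ∈ (armVisitB fuel s (seen, order)).2) ∨ x ∈ seen) ∧
    (∀ x ∈ (armVisitB fuel s (seen, order)).2, x ∈ (armVisitB fuel s (seen, order)).1) := by
  intro fuel
  induction fuel with
  | zero => intro s seen order hf; exact absurd hf (Nat.not_lt_zero _)
  | succ n ih =>
    intro s seen order hf hinv hord
    by_cases hs : PySem.Set.contains seen s = true
    · have hmem : s ∈ seen := (PySem.Set.contains_iff _ _).mp hs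
      have hres : armVisitB (n + 1) s (seen, order) = (seen, order) := by
        simp [armVisitB, hmem]
      rw [hres]
      rcases hinv s hmem with hdone | hgt
      · exact ⟨(update_of_subset order (Lv s) hdone).symm, fun x hx => hx,
          fun x hx => Or.inr hx, hord⟩
      · exact absurd hgt (lt_irrefl _)
    · have hnmem : s ∉ seen := fun hmem => hs ((PySem.Set.contains_iff _ _).mpr hmem)
      have hfgB : fgB s = fg.get? s := fgB_eq s
      cases hg : fg.get? s with
      | none =>
        have hres : armVisitB (n + 1) s (seen, order) =
            (PySem.Set.add seen s, order ++ [s]) := by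
          simp [armVisitB, hnmem, hfgB, hg]
        rw [hres]
        have hLv : Lv s = [s] := by rw [Lv_unfold s, hg]
        have hso : s ∉ order := fun hmem => hnmem (hord s hmem)
        refine ⟨?_, fun x hx => (PySem.Set.mem_add _ _ _).mpr (Or.inl hx), ?_, ?_⟩
        · rw [hLv, PySem.Set.update_cons, PySem.Set.update_nil, PySem.Set.add_of_not_mem hso]
        · intro x hx
          rcases (PySem.Set.mem_add _ _ _).mp hx with hx | rfl
          · exact Or.inr hx
          · refine Or.inl fun y hy => ?_
            rw [hLv] at hy
            simp only [List.mem_singleton] at hy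
            simp [hy]
        · intro x hx
          rcases List.mem_append.mp hx with hx | hx
          · exact (PySem.Set.mem_add _ _ _).mpr (Or.inl (hord x hx))
          · simp only [List.mem_singleton] at hx
            exact (PySem.Set.mem_add _ _ _).mpr (Or.inr hx)
      | some ms =>
        obtain ⟨hpos, hlt⟩ := fg_edges s ms hg
        have hres : armVisitB (n + 1) s (seen, order) =
            armVisitList (armVisitB n) ms (PySem.Set.add seen s, order) := by
          simp [armVisitB, hnmem, hfgB, hg]
        have inner : ∀ (l : List String) (sn : PySem.Set String) (ot : List String),
            (∀ m ∈ l, rnk m < rnk s) →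
            (∀ x ∈ sn, (∀ y ∈ Lv x, y ∈ ot) ∨ (x ∈ seen ∧ rnk s < rnk x) ∨ x = s) →
            (∀ x ∈ ot, x ∈ sn) →
            (armVisitList (armVisitB n) l (sn, ot)).2 =
              PySem.Set.update ot (l.flatMap Lv) ∧
            (∀ x ∈ sn, x ∈ (armVisitList (armVisitB n) l (sn, ot)).1) ∧
            (∀ x ∈ (armVisitList (armVisitB n) l (sn, ot)).1,
              (∀ y ∈ Lv x, y ∈ (armVisitList (armVisitB n) l (sn, ot)).2) ∨ x ∈ sn) ∧
            (∀ x ∈ (armVisitList (armVisitB n) l (sn, ot)).2,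
              x ∈ (armVisitList (armVisitB n) l (sn, ot)).1) := by
          intro l
          induction l with
          | nil =>
            intro sn ot _ _ hord2
            exact ⟨(PySem.Set.update_nil ot).symm, fun x hx => hx, fun x hx => Or.inr hx, hord2⟩
          | cons m l ihl =>
            intro sn ot hrk hinv2 hord2
            have hmf : rnk m < n := by have := hrk m (by simp); omega
            have hinvm : ∀ x ∈ sn, (∀ y ∈ Lv x, y ∈ ot) ∨ rnk m < rnk x := by
              intro x hx
              rcases hinv2 x hx with hd | ⟨_, hgt⟩ | rfl
              · exact Or.inl hd
              · exact Or.inr (by have := hrk m (by simp); omega)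
              · exact Or.inr (hrk m (by simp))
            obtain ⟨h1, h2, h3, h4⟩ := ih m sn ot hmf hinvm hord2
            rcases hv : armVisitB n m (sn, ot) with ⟨sn1, ot1⟩
            rw [hv] at h1 h2 h3 h4
            simp only at h1 h2 h3 h4
            have hsub1 : ∀ y ∈ ot, y ∈ ot1 := by
              intro y hy; rw [h1]; exact (PySem.Set.mem_update _ _ _).mpr (Or.inl hy)
            have hinv2' : ∀ x ∈ sn1,
                (∀ y ∈ Lv x, y ∈ ot1) ∨ (x ∈ seen ∧ rnk s < rnk x) ∨ x = s := by
              intro x hx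
              rcases h3 x hx with hd | hx'
              · exact Or.inl hd
              · rcases hinv2 x hx' with hd | hrest
                · exact Or.inl fun y hy => hsub1 y (hd y hy)
                · exact Or.inr hrest
            obtain ⟨g1, g2, g3, g4⟩ := ihl sn1 ot1 (fun m' hm' => hrk m' (by simp [hm'])) hinv2' h4
            simp only [armVisitList]
            rw [hv]
            refine ⟨?_, ?_, ?_, g4⟩
            · rw [g1, h1, ← PySem.Set.update_append, List.flatMap_cons]
            · intro x hx
              exact g2 x (h2 x hx)
            · intro x hx
              rcases g3 x hx with hd | hx'
              · exact Or.inl hd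
              · rcases h3 x hx' with hd | hx''
                · refine Or.inl fun y hy => ?_
                  rw [g1]
                  exact (PySem.Set.mem_update _ _ _).mpr (Or.inl (hd y hy))
                · exact Or.inr hx''
        rw [hres]
        have hinit : ∀ x ∈ PySem.Set.add seen s,
            (∀ y ∈ Lv x, y ∈ order) ∨ (x ∈ seen ∧ rnk s < rnk x) ∨ x = s := by
          intro x hx
          rcases (PySem.Set.mem_add _ _ _).mp hx with hx | rfl
          · rcases hinv x hx with hd | hgt
            · exact Or.inl hd
            · exact Or.inr (Or.inl ⟨hx, hgt⟩)
          · exact Or.inr (Or.inr rfl)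
        have hord1 : ∀ x ∈ order, x ∈ PySem.Set.add seen s := fun x hx =>
          (PySem.Set.mem_add _ _ _).mpr (Or.inl (hord x hx))
        obtain ⟨k1, k2, k3, k4⟩ := inner ms (PySem.Set.add seen s) order hlt hinit hord1
        have hLv : Lv s = ms.flatMap Lv := by rw [Lv_unfold s, hg]
        refine ⟨by rw [k1, hLv], ?_, ?_, k4⟩
        · intro x hx
          exact k2 x ((PySem.Set.mem_add _ _ _).mpr (Or.inl hx))
        · intro x hx
          rcases k3 x hx with hd | hx'
          · exact Or.inl hd
          · rcases (PySem.Set.mem_add _ _ _).mp hx' with hx'' | rfl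
            · exact Or.inr hx''
            · refine Or.inl fun y hy => ?_
              rw [k1]
              exact (PySem.Set.mem_update _ _ _).mpr (Or.inr (by rw [hLv] at hy; exact hy))

theorem portB_eq (features : List String) : armResolveFgroups_alt features = canonC features := by
  have main : ∀ (l : List String) (seen : PySem.Set String) (order : List String),
      (∀ x ∈ seen, ∀ y ∈ Lv x, y ∈ order) →
      (∀ x ∈ order, x ∈ seen) →
      (armVisitList (armVisitB 16) l (seen, order)).2 =
        PySem.Set.update order (l.flatMap Lv) ∧
      (∀ x ∈ (armVisitList (armVisitB 16) l (seen, order)).1,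
        ∀ y ∈ Lv x, y ∈ (armVisitList (armVisitB 16) l (seen, order)).2) ∧
      (∀ x ∈ (armVisitList (armVisitB 16) l (seen, order)).2,
        x ∈ (armVisitList (armVisitB 16) l (seen, order)).1) := by
    intro l
    induction l with
    | nil =>
      intro seen order hinv hord
      exact ⟨(PySem.Set.update_nil order).symm, hinv, hord⟩
    | cons f l ihl =>
      intro seen order hinv hord
      have hf : rnk f < 16 := by have := rnk_le f; omega
      obtain ⟨h1, h2, h3, h4⟩ := armVisitB_spec 16 f seen order hf
        (fun x hx => Or.inl (hinv x hx)) hord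
      rcases hv : armVisitB 16 f (seen, order) with ⟨sn1, ot1⟩
      rw [hv] at h1 h2 h3 h4
      simp only at h1 h2 h3 h4
      have hinv' : ∀ x ∈ sn1, ∀ y ∈ Lv x, y ∈ ot1 := by
        intro x hx
        rcases h3 x hx with hd | hx'
        · exact hd
        · intro y hy
          rw [h1]
          exact (PySem.Set.mem_update _ _ _).mpr (Or.inl (hinv x hx' y hy))
      obtain ⟨g1, g2, g3⟩ := ihl sn1 ot1 hinv' h4
      simp only [armVisitList]
      rw [hv]
      refine ⟨?_, g2, g3⟩
      rw [g1, h1, ← PySem.Set.update_append, List.flatMap_cons]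
  obtain ⟨h1, -, -⟩ := main features PySem.Set.empty []
    (by intro x hx; simp [PySem.Set.empty] at hx) (by intro x hx; simp at hx)
  have hord : (armVisitList (armVisitB 16) features (PySem.Set.empty, [])).2 =
      PySem.Set.ofList (features.flatMap Lv) := by
    rw [h1, PySem.Set.update_nil_left]
  rw [armResolveFgroups_alt, hord,
    PySem.Set.ofList_eq_self_of_nodup _ (PySem.Set.nodup_ofList _), canonC,
    PySem.Set.update_empty]

-- ===== VERDICT (by name: the statement is the Claim_ definition above) =====
theorem armResolveFgroups_spec : Claim_equal_armResolveFgroups := by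
  intro features _
  unfold Spec_armResolveFgroups
  rw [portA_eq, portB_eq]
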